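/- GENERATED by tools/mkcompositions.py from design/units.gif.tsv (unit `DGifGetImageDesc.COMPOSITION`) — do not edit.
   THE PROOF of the composition unit `DGifGetImageDesc.COMPOSITION`: the 7 segments of `DGifGetImageDesc` chain into its contract, by the theorem
   `Gif.Spec.DGifGetImageDesc.compose` (proved next to the cut assertions). -/
import Gif.Spec.Units.DGifGetImageDesc_COMPOSITION

/-- The segments of `DGifGetImageDesc` compose into its contract. -/
theorem Gif.Spec.Proved.DGifGetImageDesc_COMPOSITION_ok : Gif.Spec.DGifGetImageDesc_COMPOSITION.Statement := by
  intro Lay _hLay μ _hμ u₀ h_DGifGetImageDesc_1 h_DGifGetImageDesc_2 h_DGifGetImageDesc_3 h_DGifGetImageDesc_4 h_DGifGetImageDesc_5 h_DGifGetImageDesc_6 h_DGifGetImageDesc_E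
  apply Gif.Spec.DGifGetImageDesc.compose
  all_goals assumption
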